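-- pv_equiv track=rewrite | github.com/droidfringe/Big-Data-Analytics-CSE545 | Assignment 2/a2_ahuja.py | isCandidate
-- ===== SOURCE A (Python) =====
-- from math import floor, sqrt
--
-- def isCandidate(hashCode1, hashCode2, bands=None):
--     #hashCode1 = bin(int(hashCode1, 16))
--     hashCode1 = format(int(hashCode1, 16),'b').zfill(128)
--     hashCode2 = format(int(hashCode2, 16),'b').zfill(128)
--     if(bands == None):
--         bands = 8
--     bandwidth = floor(len(hashCode1)/bands)
--     for i in range(0,bands):
--         if(hashCode1[i*bandwidth:(i+1)*bandwidth] == hashCode2[i*bandwidth:(i+1)*bandwidth]):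
--             return True
--     return False
-- ===== SOURCE B (Python) =====
-- def isCandidate(hashCode1, hashCode2, bands=None):
--     if bands is None:
--         bands = 8
--     diff = int(hashCode1, 16) ^ int(hashCode2, 16)
--     bandwidth = 128 // bands
--     mask = (1 << bandwidth) - 1
--     return any((diff >> (128 - (i + 1) * bandwidth)) & mask == 0
--                for i in range(bands))
-- ===== Notes on version B (the rewrite author's own statement) =====
-- stated objective: alternative
-- what changed: B never builds or slices the zfill-padded binary strings: it treats the two 128-bit signatures as integers and tests each band by checking that the band's bit field of their xor is zero (shift + mask), with the same early exit; Pre_ restricts to valid hex encodings of 128-bit (nonnegative, < 2^128) signatures and positive band counts, excluding invalid hex and bands=0 (where A raises), negative bands (where B's shift-width raises), and negative or >128-bit hex values, where A's band geometry follows the accidental unpadded string length and sign character.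
-- outside the precondition, e.g. on isCandidate('1', '2', -2): A returns False, B raises ValueError; on isCandidate('-1', '1', None): A returns True, B returns False
import Mathlib
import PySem

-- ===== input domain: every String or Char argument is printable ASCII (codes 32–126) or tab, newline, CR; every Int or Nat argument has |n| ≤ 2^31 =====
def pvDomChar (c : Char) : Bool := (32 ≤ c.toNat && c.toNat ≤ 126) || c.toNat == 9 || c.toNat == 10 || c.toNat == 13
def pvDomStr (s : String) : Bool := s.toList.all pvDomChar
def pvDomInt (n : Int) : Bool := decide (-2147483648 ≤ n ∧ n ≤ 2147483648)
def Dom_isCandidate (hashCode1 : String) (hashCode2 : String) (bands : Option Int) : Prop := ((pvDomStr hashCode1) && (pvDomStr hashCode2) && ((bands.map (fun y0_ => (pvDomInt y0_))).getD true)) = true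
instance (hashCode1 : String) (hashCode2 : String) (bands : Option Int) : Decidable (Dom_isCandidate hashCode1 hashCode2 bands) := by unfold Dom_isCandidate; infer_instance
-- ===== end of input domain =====

-- B drops A's zfill-padded binary strings and per-band string slicing: it tests each band's
-- bit field of the xor of the two parsed 128-bit signatures with a shift and a mask.

-- ===== PORT A =====
-- Python's floor(len/bands) on these magnitudes equals integer floor division; ported as floordiv.
def isCandidate (hashCode1 : String) (hashCode2 : String) (bands : Option Int) : Bool :=
  match PySem.Int.ofStrBase? hashCode1 16, PySem.Int.ofStrBase? hashCode2 16 with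
  | some v1, some v2 =>
    let h1 := PySem.Chars.zfill (PySem.Int.toBinChars v1) 128
    let h2 := PySem.Chars.zfill (PySem.Int.toBinChars v2) 128
    let b := bands.getD 8
    if b = 0 then false  -- ZeroDivisionError in floor(len/bands); outside Pre_
    else
      let bandwidth := PySem.Int.floordiv (h1.length : Int) b
      (PySem.List.pyRange 0 b 1).any (fun i =>
        PySem.List.slice h1 (some (i * bandwidth)) (some ((i + 1) * bandwidth))
          == PySem.List.slice h2 (some (i * bandwidth)) (some ((i + 1) * bandwidth)))
  | _, _ => false  -- ValueError from int(s, 16); outside Pre_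

-- ===== PORT B =====
def isCandidate_alt (hashCode1 : String) (hashCode2 : String) (bands : Option Int) : Bool :=
  match PySem.Int.ofStrBase? hashCode1 16 with
  | none => false  -- ValueError from int(s, 16); outside Pre_
  | some x =>
  match PySem.Int.ofStrBase? hashCode2 16 with
  | none => false  -- ValueError from int(s, 16); outside Pre_
  | some y =>
    let b := bands.getD 8
    if b ≤ 0 then false  -- b = 0: ZeroDivisionError at 128 // bands; b < 0: ValueError at 1 << bandwidth; outside Pre_
    else
      let diff := PySem.Int.bxor x y
      let bandwidth := PySem.Int.floordiv 128 b
      let mask := ((1 : Int) <<< bandwidth.toNat) - 1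
      (PySem.List.pyRange 0 b 1).any (fun i =>
        PySem.Int.band (diff >>> ((128 : Int) - (i + 1) * bandwidth).toNat) mask == 0)

-- ===== PRECONDITION & SPEC =====
-- Pre_ restricts to the function's natural domain: valid hex encodings of 128-bit LSH
-- signatures (nonnegative values below 2^128) and a positive band count. It excludes
-- invalid hex and bands = 0 (A raises ValueError / ZeroDivisionError), negative bands
-- (A returns False only because its range is empty; B's negative shift width raises),
-- and negative or >128-bit hex values, on which A returns a value whose band geometry
-- follows the accidental unpadded string length and leading sign character.
def Pre_isCandidate (hashCode1 : String) (hashCode2 : String) (bands : Option Int) : Prop :=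
  ((PySem.Int.ofStrBase? hashCode1 16).map (fun v => decide (0 ≤ v ∧ v < 2 ^ 128))).getD false = true ∧
  ((PySem.Int.ofStrBase? hashCode2 16).map (fun v => decide (0 ≤ v ∧ v < 2 ^ 128))).getD false = true ∧
  0 < bands.getD 8
instance (hashCode1 : String) (hashCode2 : String) (bands : Option Int) : Decidable (Pre_isCandidate hashCode1 hashCode2 bands) := by unfold Pre_isCandidate; infer_instance

def pvWitness_isCandidate : String × String × Option Int := ("a3f", "A3F", none)

def Spec_isCandidate (hashCode1 : String) (hashCode2 : String) (bands : Option Int) (out : Bool) : Prop := out = isCandidate_alt hashCode1 hashCode2 bands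
instance (hashCode1 : String) (hashCode2 : String) (bands : Option Int) (out : Bool) : Decidable (Spec_isCandidate hashCode1 hashCode2 bands out) := by unfold Spec_isCandidate; infer_instance

-- ===== CLAIM (what is proved, stated in full; the proofs are below) =====
def Claim_equal_isCandidate : Prop := ∀ (hashCode1 : String) (hashCode2 : String) (bands : Option Int), Dom_isCandidate hashCode1 hashCode2 bands → Pre_isCandidate hashCode1 hashCode2 bands → Spec_isCandidate hashCode1 hashCode2 bands (isCandidate hashCode1 hashCode2 bands)

-- ===== LEMMAS AND PROOFS =====

def bitsOf (n L : Nat) : List Char :=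
  (List.range L).map (fun j => if n.testBit (L - 1 - j) then '1' else '0')

theorem pv_size_succ (n : Nat) (hn : 1 ≤ n) : Nat.size n = Nat.size (n / 2) + 1 := by
  have h := Nat.size_bit (b := Nat.bodd n) (n := Nat.div2 n)
    (by rw [Nat.bit_bodd_div2]; omega)
  rw [Nat.bit_bodd_div2] at h
  simpa [Nat.div2_val] using h

theorem pv_bitsOf_succ (n m : Nat) :
    bitsOf n (m + 1) = bitsOf (n / 2) m ++ [(n % 2).digitChar] := by
  unfold bitsOf
  rw [List.range_succ, List.map_append]
  congr 1
  · apply List.map_congr_left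
    intro j hj
    rw [List.mem_range] at hj
    rw [Nat.testBit_div_two]
    have h : m + 1 - 1 - j = (m - 1 - j) + 1 := by omega
    rw [h]
  · simp only [List.map_cons, List.map_nil]
    congr 1
    rcases Nat.mod_two_eq_zero_or_one n with h | h <;>
      simp [Nat.testBit_zero, h, Nat.digitChar]

theorem pv_binAux (fuel n : Nat) (acc : List Char) (h : n < fuel) :
    Nat.toDigitsCore 2 fuel n acc = bitsOf n (max 1 (Nat.size n)) ++ acc := by
  induction fuel generalizing n acc with
  | zero => omega
  | succ f ih =>
    rw [Nat.toDigitsCore]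
    by_cases h2 : n / 2 = 0
    · rw [if_pos h2]
      have : n < 2 := by omega
      interval_cases n <;> simp [bitsOf] <;> rfl
    · rw [if_neg h2, ih _ _ (by omega)]
      have hs := pv_size_succ n (by omega)
      have h1 : 1 ≤ Nat.size (n / 2) := by
        exact Nat.size_pos.mpr (by omega)
      have hm : max 1 (Nat.size n) = max 1 (Nat.size (n / 2)) + 1 := by omega
      rw [hm, pv_bitsOf_succ, List.append_assoc]
      rfl

theorem pv_toDigits_two (n : Nat) : Nat.toDigits 2 n = bitsOf n (max 1 (Nat.size n)) := by
  have := pv_binAux (n + 1) n [] (by omega)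
  simpa [Nat.toDigits] using this

theorem pv_bits_pad (n s L : Nat) (h1 : max 1 (Nat.size n) = s) (hsL : s ≤ L) :
    List.replicate (L - s) '0' ++ bitsOf n s = bitsOf n L := by
  apply List.ext_getElem
  · simp [bitsOf]; omega
  · intro j hj hj2
    simp only [bitsOf, List.length_append, List.length_replicate, List.length_map,
      List.length_range] at hj hj2 ⊢
    by_cases hc : j < L - s
    · rw [List.getElem_append_left (by simpa using hc)]
      simp only [List.getElem_replicate, List.getElem_map, List.getElem_range]
      have hbit : n.testBit (L - 1 - j) = false := by
        apply Nat.testBit_lt_two_pow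
        calc n < 2 ^ Nat.size n := Nat.lt_size_self n
        _ ≤ 2 ^ (L - 1 - j) := Nat.pow_le_pow_right (by omega) (by omega)
      rw [hbit]; simp
    · rw [List.getElem_append_right (by simp; omega)]
      simp only [List.getElem_map, List.getElem_range, List.length_replicate]
      have hjL : j < L := by simpa [bitsOf] using hj2
      have hidx : s - 1 - (j - (L - s)) = L - 1 - j := by omega
      rw [hidx]

theorem pv_bitsOf_length (n L : Nat) : (bitsOf n L).length = L := by simp [bitsOf]

theorem pv_zfill_cons (c : Char) (rest : List Char) (hc : ¬(c = '+' ∨ c = '-'))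
    (hlen : ¬((128 : Int) ≤ ((c :: rest).length : Int))) :
    PySem.Chars.zfill (c :: rest) 128 =
      List.replicate (128 - (c :: rest).length) '0' ++ (c :: rest) := by
  unfold PySem.Chars.zfill
  rw [if_neg hlen]
  simp only [if_neg hc]
  have : ((128 : Int)).toNat = 128 := by decide
  rw [this]

theorem pv_head_bitsOf (n t : Nat) :
    bitsOf n (t + 1) = (if n.testBit t then '1' else '0') :: (List.range t).map
      (fun j => if n.testBit (t + 1 - 1 - (j + 1)) then '1' else '0') := by
  unfold bitsOf
  rw [List.range_succ_eq_map]
  simp only [List.map_cons, List.map_map]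
  congr 1

theorem pv_zfill_bits (n L : Nat) (hL : L = max (max 1 (Nat.size n)) 128) :
    PySem.Chars.zfill (Nat.toDigits 2 n) 128 = bitsOf n L := by
  rw [pv_toDigits_two]
  set s := max 1 (Nat.size n) with hs
  by_cases hbig : (128 : Int) ≤ ((bitsOf n s).length : Int)
  · rw [pv_bitsOf_length] at hbig
    have hLs : L = s := by omega
    unfold PySem.Chars.zfill
    rw [if_pos (by rw [pv_bitsOf_length]; exact_mod_cast hbig), hLs]
  · obtain ⟨t, ht⟩ : ∃ t, s = t + 1 := ⟨s - 1, by omega⟩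
    rw [pv_bitsOf_length] at hbig
    rw [ht, pv_head_bitsOf]
    rw [pv_zfill_cons _ _ (by by_cases hb : n.testBit t <;> simp [hb])
        (by rw [← pv_head_bitsOf, pv_bitsOf_length]; exact_mod_cast (by omega : ¬ (128 ≤ t + 1)) )]
    rw [← pv_head_bitsOf, pv_bitsOf_length, ← ht]
    have hL128 : L = 128 := by omega
    rw [hL128]
    exact pv_bits_pad n s 128 hs.symm (by omega)

theorem pv_slice_bitsOf (n L a b : Nat) :
    PySem.List.slice (bitsOf n L) (some (a : Int)) (some (b : Int)) =
      (List.range (min b L - min a L)).map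
        (fun k => if n.testBit (L - 1 - (a + k)) then '1' else '0') := by
  rw [PySem.List.slice_natCast]
  apply List.ext_getElem
  · simp [bitsOf]; omega
  · intro j hj hj2
    simp only [List.length_take, List.length_drop, List.length_map, List.length_range,
      bitsOf] at hj hj2
    rw [List.getElem_take, List.getElem_drop]
    simp only [bitsOf, List.getElem_map, List.getElem_range]

theorem pv_map_range_eq_iff {α : Type} (f g : Nat → α) (m1 m2 : Nat) :
    ((List.range m1).map f = (List.range m2).map g) ↔ (m1 = m2 ∧ ∀ k < m1, f k = g k) := by
  constructor
  · intro h
    have hlen : m1 = m2 := by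
      have := congrArg List.length h
      simpa using this
    refine ⟨hlen, fun k hk => ?_⟩
    have := congrArg (fun l => l[k]?) h
    simpa [List.getElem?_map, List.getElem?_range, hk, hlen ▸ hk] using this
  · rintro ⟨rfl, h⟩
    apply List.map_congr_left
    intro k hk
    exact h k (List.mem_range.mp hk)

theorem pv_field_eq_iff (n n' s s' w : Nat) :
    ((n >>> s) % 2 ^ w = (n' >>> s') % 2 ^ w) ↔
      (∀ k < w, n.testBit (s + k) = n'.testBit (s' + k)) := by
  constructor
  · intro h k hk
    have := congrArg (fun m => m.testBit k) h
    simpa [Nat.testBit_mod_two_pow, Nat.testBit_shiftRight, hk] using this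
  · intro h
    apply Nat.eq_of_testBit_eq
    intro i
    rw [Nat.testBit_mod_two_pow, Nat.testBit_mod_two_pow]
    by_cases hi : i < w
    · simp [hi, Nat.testBit_shiftRight, h i hi]
    · simp [hi]

-- the xor band field is zero iff the two band fields agree
theorem pv_xor_field (n1 n2 s w : Nat) :
    (((n1 ^^^ n2) >>> s) % 2 ^ w = 0) ↔
      ((n1 >>> s) % 2 ^ w = (n2 >>> s) % 2 ^ w) := by
  rw [pv_field_eq_iff]
  constructor
  · intro h k hk
    have := congrArg (fun m => m.testBit k) h
    simp only [Nat.testBit_mod_two_pow, Nat.testBit_shiftRight, hk, decide_true,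
      Bool.true_and, Nat.zero_testBit, Nat.testBit_xor] at this
    by_cases hx : n1.testBit (s + k) <;> by_cases hy : n2.testBit (s + k) <;>
      simp [hx, hy] at this ⊢
  · intro h
    apply Nat.eq_of_testBit_eq
    intro i
    rw [Nat.testBit_mod_two_pow, Nat.zero_testBit]
    by_cases hi : i < w
    · simp only [hi, decide_true, Bool.true_and, Nat.testBit_shiftRight, Nat.testBit_xor,
        h i hi]
      simp
    · simp [hi]

-- one band: A's string-slice comparison equals B's shift-and-mask test on the xor
theorem pv_band_point (n1 n2 : Nat) (i w : Int) (hi : 0 ≤ i) (hw : 0 ≤ w)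
    (hbw : (i + 1) * w ≤ 128) :
    (PySem.List.slice (bitsOf n1 128) (some (i * w)) (some ((i + 1) * w))
       == PySem.List.slice (bitsOf n2 128) (some (i * w)) (some ((i + 1) * w))) =
    (PySem.Int.band (((n1 ^^^ n2 : Nat) : Int) >>> ((128 : Int) - (i + 1) * w).toNat)
        (((1 : Int) <<< w.toNat) - 1) == 0) := by
  obtain ⟨iN, rfl⟩ : ∃ m : Nat, i = (m : Int) := ⟨i.toNat, by omega⟩
  obtain ⟨wN, rfl⟩ : ∃ m : Nat, w = (m : Int) := ⟨w.toNat, by omega⟩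
  have ha : (iN : Int) * wN = ((iN * wN : Nat) : Int) := by push_cast; ring
  have hb : ((iN : Int) + 1) * wN = (((iN + 1) * wN : Nat) : Int) := by push_cast; ring
  set aN : Nat := iN * wN
  set bN : Nat := (iN + 1) * wN
  have hbN : bN ≤ 128 := by
    have : ((bN : Nat) : Int) ≤ 128 := by rw [← hb]; exact hbw
    exact_mod_cast this
  have haN : aN ≤ bN := Nat.mul_le_mul_right _ (by omega)
  rw [ha, hb]
  have hsh : (((128 : Int)) - ((bN : Nat) : Int)).toNat = 128 - bN := by omega
  rw [hsh]
  have hshift : (((n1 ^^^ n2 : Nat) : Int) >>> (128 - bN)) =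
      (((n1 ^^^ n2) >>> (128 - bN) : Nat) : Int) := (Int.natCast_shiftRight _ _).symm
  have hone : (((1 : Int) <<< ((wN : Int)).toNat) - 1) = ((2 ^ wN - 1 : Nat) : Int) := by
    rw [Int.toNat_natCast]
    have : ((1 : Int) <<< wN) = ((1 <<< wN : Nat) : Int) := (Int.natCast_shiftLeft _ _).symm
    rw [this, Nat.one_shiftLeft, Nat.cast_sub Nat.one_le_two_pow]
    norm_num
  rw [hshift, hone, PySem.Int.band_natCast, Nat.and_two_pow_sub_one_eq_mod]
  rw [pv_slice_bitsOf, pv_slice_bitsOf]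
  rw [Bool.eq_iff_iff]
  simp only [beq_iff_eq, Nat.cast_eq_zero]
  rw [pv_map_range_eq_iff, pv_xor_field]
  have hminb : min bN 128 = bN := by omega
  have hmina : min aN 128 = aN := by omega
  have hm : min bN 128 - min aN 128 = wN := by
    rw [hminb, hmina]
    have : bN = aN + wN := by simp [aN, bN]; ring
    omega
  rw [hm, pv_field_eq_iff]
  constructor
  · rintro ⟨_, hpt⟩ k hk
    have := hpt (wN - 1 - k) (by omega)
    have e : 128 - 1 - (aN + (wN - 1 - k)) = 128 - bN + k := by
      have : bN = aN + wN := by simp [aN, bN]; ring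
      omega
    rw [e] at this
    by_cases hx : n1.testBit (128 - bN + k) <;> by_cases hy : n2.testBit (128 - bN + k) <;>
      simp [hx, hy] at this ⊢
  · intro h
    refine ⟨rfl, fun k hk => ?_⟩
    have := h (wN - 1 - k) (by omega)
    have e : 128 - bN + (wN - 1 - k) = 128 - 1 - (aN + k) := by
      have : bN = aN + wN := by simp [aN, bN]; ring
      omega
    rw [e] at this
    rw [this]

theorem pv_any_congr_mem {α : Type} (l : List α) (p q : α → Bool)
    (h : ∀ x ∈ l, p x = q x) : l.any p = l.any q := by
  induction l with
  | nil => rfl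
  | cons a t ih => simp_all

theorem pv_main (h1 h2 : String) (bands : Option Int)
    (hp1 : ((PySem.Int.ofStrBase? h1 16).map (fun v => decide (0 ≤ v ∧ v < 2 ^ 128))).getD false = true)
    (hp2 : ((PySem.Int.ofStrBase? h2 16).map (fun v => decide (0 ≤ v ∧ v < 2 ^ 128))).getD false = true)
    (hb : 0 < bands.getD 8) :
    isCandidate h1 h2 bands = isCandidate_alt h1 h2 bands := by
  rcases hv1 : PySem.Int.ofStrBase? h1 16 with _ | v1
  · rw [hv1] at hp1; simp at hp1
  rcases hv2 : PySem.Int.ofStrBase? h2 16 with _ | v2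
  · rw [hv2] at hp2; simp at hp2
  rw [hv1] at hp1
  rw [hv2] at hp2
  simp only [Option.map_some, Option.getD_some, decide_eq_true_eq] at hp1 hp2
  obtain ⟨n1, rfl⟩ : ∃ m : Nat, v1 = (m : Int) := ⟨v1.toNat, by omega⟩
  obtain ⟨n2, rfl⟩ : ∃ m : Nat, v2 = (m : Int) := ⟨v2.toNat, by omega⟩
  have hn1 : n1 < 2 ^ 128 := by exact_mod_cast hp1.2
  have hn2 : n2 < 2 ^ 128 := by exact_mod_cast hp2.2
  unfold isCandidate isCandidate_alt
  rw [hv1, hv2]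
  simp only
  have hbin1 : PySem.Chars.zfill (PySem.Int.toBinChars (n1 : Int)) 128 = bitsOf n1 128 := by
    unfold PySem.Int.toBinChars
    rw [if_neg (by omega), Int.toNat_natCast]
    exact pv_zfill_bits n1 _ (by have := Nat.size_le.mpr hn1; omega)
  have hbin2 : PySem.Chars.zfill (PySem.Int.toBinChars (n2 : Int)) 128 = bitsOf n2 128 := by
    unfold PySem.Int.toBinChars
    rw [if_neg (by omega), Int.toNat_natCast]
    exact pv_zfill_bits n2 _ (by have := Nat.size_le.mpr hn2; omega)
  rw [hbin1, hbin2]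
  set b : Int := bands.getD 8 with hbdef
  clear_value b
  rw [if_neg (by omega), if_neg (by omega)]
  rw [PySem.Int.bxor_natCast]
  have hlen : ((bitsOf n1 128).length : Int) = (128 : Int) := by
    rw [pv_bitsOf_length]; norm_num
  rw [hlen]
  apply pv_any_congr_mem
  intro i hi
  rw [PySem.List.mem_pyRange_one] at hi
  obtain ⟨bN, rfl⟩ : ∃ m : Nat, b = (m : Int) := ⟨b.toNat, by omega⟩
  have hw128 : ((128 : Nat) : Int) = (128 : Int) := by norm_num
  have hfd : PySem.Int.floordiv 128 ((bN : Nat) : Int) = ((128 / bN : Nat) : Int) := by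
    rw [← hw128, PySem.Int.floordiv_natCast]
  rw [hfd]
  apply pv_band_point
  · exact hi.1
  · positivity
  · obtain ⟨iN, rfl⟩ : ∃ m : Nat, i = (m : Int) := ⟨i.toNat, by omega⟩
    have hiN : iN + 1 ≤ bN := by
      have := hi.2
      exact_mod_cast this
    have : (iN + 1) * (128 / bN) ≤ bN * (128 / bN) := Nat.mul_le_mul_right _ hiN
    have hmul : bN * (128 / bN) ≤ 128 := by
      rw [Nat.mul_comm]; exact Nat.div_mul_le_self 128 bN
    push_cast
    have : (iN + 1) * (128 / bN) ≤ 128 := le_trans ‹_› hmul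
    exact_mod_cast this

-- ===== VERDICT (by name: the statement is the Claim_ definition above) =====
theorem isCandidate_spec : Claim_equal_isCandidate := by
  intro hashCode1 hashCode2 bands _ hpre
  unfold Pre_isCandidate at hpre
  unfold Spec_isCandidate
  exact pv_main hashCode1 hashCode2 bands hpre.1 hpre.2.1 hpre.2.2
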